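-- pv_equiv track=rewrite | github.com/MANU4141/zeroback-project | backend/app.py | combine_multiple_image_results
-- ===== SOURCE A (Python) =====
-- def combine_multiple_image_results(results_list):
--     """
--     여러 이미지 분석 결과를 통합하여 가장 많이 등장한 속성 위주로 반환
--     """
--     from collections import Counter
--
--     valid_results = [r for r in results_list if r.get("attributes") is not None]
--     if not valid_results:
--         return None
--     combined = {}
--     for r in valid_results:
--         for k, v in r["attributes"].items():
--             combined.setdefault(k, [])
--             if isinstance(v, list):
--                 for item in v:
--                     combined[k].append(
--                         item.get("class_name") if isinstance(item, dict) else str(item)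
--                     )
--             else:
--                 combined[k].append(str(v))
--     # 최빈값 위주로 정리
--     summary = {}
--     for k, vlist in combined.items():
--         if not vlist:
--             continue
--         counter = Counter(vlist)
--         summary[k] = [item for item, _ in counter.most_common(3)]
--     return summary
-- ===== SOURCE B (Python) =====
-- def combine_multiple_image_results(results_list):
--     """Flatten every attribute occurrence into one (key, value) stream while
--     recording key first-appearance order, then pick each key's top-3 values by
--     repeated argmax over its counts (selection, no Counter/most_common/sort)."""
--     pairs = []
--     key_order = []
--     found = False
--     for r in results_list:
--         attrs = r.get("attributes")
--         if attrs is None: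
--             continue
--         found = True
--         for k, v in attrs.items():
--             if k not in key_order:
--                 key_order.append(k)
--             if isinstance(v, list):
--                 for item in v:
--                     pairs.append(
--                         (k, item.get("class_name") if isinstance(item, dict) else str(item))
--                     )
--             else:
--                 pairs.append((k, str(v)))
--     if not found:
--         return None
--     summary = {}
--     for k in key_order:
--         cnt = {}
--         for kk, s in pairs:
--             if kk == k:
--                 cnt[s] = cnt.get(s, 0) + 1
--         top = []
--         while len(top) < 3:
--             best = None
--             for s in cnt:
--                 if s in top:
--                     continue
--                 if best is None or cnt[s] > cnt[best]:
--                     best = s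
--             if best is None:
--                 break
--             top.append(best)
--         if top:
--             summary[k] = top
--     return summary
-- ===== Notes on version B (the rewrite author's own statement) =====
-- stated objective: alternative
-- what changed: Replaces A's dict-of-value-lists plus per-key Counter.most_common(3) (a stable sort) with a flattened (key,value) occurrence stream plus key first-appearance list, per-key counts built from that stream, and top-3 chosen by repeated argmax selection over the counts (no Counter, no sorting).
import Mathlib
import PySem

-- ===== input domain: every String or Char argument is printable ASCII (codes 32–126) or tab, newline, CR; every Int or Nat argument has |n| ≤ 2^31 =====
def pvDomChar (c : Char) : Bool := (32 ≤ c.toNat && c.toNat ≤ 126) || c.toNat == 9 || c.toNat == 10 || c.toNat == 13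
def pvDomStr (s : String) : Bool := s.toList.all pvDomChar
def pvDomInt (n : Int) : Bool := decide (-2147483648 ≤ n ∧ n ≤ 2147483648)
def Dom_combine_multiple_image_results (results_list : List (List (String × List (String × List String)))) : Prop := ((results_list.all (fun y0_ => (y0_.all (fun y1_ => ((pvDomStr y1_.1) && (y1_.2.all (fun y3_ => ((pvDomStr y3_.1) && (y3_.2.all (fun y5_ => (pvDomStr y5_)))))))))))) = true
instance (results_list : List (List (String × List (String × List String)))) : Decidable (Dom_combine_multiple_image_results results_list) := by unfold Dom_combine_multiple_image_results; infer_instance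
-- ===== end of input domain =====

-- B replaces A's dict-of-value-lists + per-key Counter.most_common(3) (a stable
-- sort) by a flattened (key, value) occurrence stream, per-key counts rebuilt
-- from that stream, and a top-3 chosen by repeated argmax selection (no sort);
-- same return value, neither mutates its input.

-- ===== PORT A =====
-- In the typed domain every attribute value is a list of strings, so the
-- `isinstance(v, list)` branch always takes the list path and each item is a
-- string (never a dict), so `str(item)` is the item itself.
-- `counter.most_common(3)` = stable descending sort of the counter's items by
-- count, first 3 (Python's heapq.nlargest rule) → sorted … true |>.take 3.
def combine_multiple_image_results (results_list : List (List (String × List (String × List String)))) : Option (List (String × List String)) :=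
  let valid := results_list.filter (fun r => ((PySem.Dict.mk r).get? "attributes").isSome)
  if valid.isEmpty then none
  else
    let combined : PySem.Dict String (List String) :=
      valid.foldl (fun d r =>
        (((PySem.Dict.mk r).get? "attributes").getD []).foldl (fun d kv =>
          let d := d.setdefault kv.1 []
          kv.2.foldl (fun d item => d.insert kv.1 (d.getD kv.1 [] ++ [item])) d) d)
        PySem.Dict.empty
    let summary : PySem.Dict String (List String) :=
      combined.items.foldl (fun s kv =>
        if kv.2.isEmpty then s
        else s.insert kv.1 (((PySem.List.sorted (PySem.Dict.counter kv.2).items (fun p => p.2) true).take 3).map (fun p => p.1)))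
        PySem.Dict.empty
    some summary.items

-- ===== PORT B =====
-- `for s in cnt` iterates the count dict's keys in insertion order; `cnt[s]` /
-- `cnt[best]` are lookups of keys known present, ported as getD _ 0.
-- one step of Source B's `for s in cnt` argmax scan
def pvStep (cnt : PySem.Dict String Int) (top : List String) (best : Option String) (s : String) : Option String :=
  if top.contains s then best
  else match best with
    | none => some s
    | some b => if cnt.getD b 0 < cnt.getD s 0 then some s else best

-- Source B's inner `for s in cnt: … best = s` scan
def pvPickBest (cnt : PySem.Dict String Int) (top : List String) : Option String :=
  cnt.keys.foldl (pvStep cnt top) none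

-- Source B's `while len(top) < 3` loop (runs at most 3 times: fuel = 3 - len(top))
def pvTop3 (cnt : PySem.Dict String Int) : Nat → List String → List String
  | 0, top => top
  | n+1, top =>
    match pvPickBest cnt top with
    | none => top
    | some b => pvTop3 cnt n (top ++ [b])

def combine_multiple_image_results_alt (results_list : List (List (String × List (String × List String)))) : Option (List (String × List String)) :=
  let st := results_list.foldl
    (fun (st : List (String × String) × List String × Bool) r =>
      match (PySem.Dict.mk r).get? "attributes" with
      | none => st
      | some attrs =>
        let pk := attrs.foldl
          (fun (pk : List (String × String) × List String) kv =>
            let ko := if pk.2.contains kv.1 then pk.2 else pk.2 ++ [kv.1]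
            (kv.2.foldl (fun ps item => ps ++ [(kv.1, item)]) pk.1, ko))
          (st.1, st.2.1)
        (pk.1, pk.2, true))
    ([], [], false)
  if !st.2.2 then none
  else
    some ((st.2.1.foldl
      (fun (s : PySem.Dict String (List String)) k =>
        let cnt := st.1.foldl
          (fun (d : PySem.Dict String Int) p =>
            if p.1 == k then d.insert p.2 (d.getD p.2 0 + 1) else d)
          PySem.Dict.empty
        let top := pvTop3 cnt 3 []
        if top.isEmpty then s else s.insert k top)
      PySem.Dict.empty).items)

-- ===== PRECONDITION & SPEC =====
def Spec_combine_multiple_image_results (results_list : List (List (String × List (String × List String)))) (out : Option (List (String × List String))) : Prop := out = combine_multiple_image_results_alt results_list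
instance (results_list : List (List (String × List (String × List String)))) (out : Option (List (String × List String))) : Decidable (Spec_combine_multiple_image_results results_list out) := by unfold Spec_combine_multiple_image_results; infer_instance

-- ===== CLAIM (what is proved, stated in full; the proofs are below) =====
def Claim_equal_combine_multiple_image_results : Prop := ∀ (results_list : List (List (String × List (String × List String)))), Dom_combine_multiple_image_results results_list → Spec_combine_multiple_image_results results_list (combine_multiple_image_results results_list)

-- ===== LEMMAS AND PROOFS =====

-- abbreviations for the per-key value list vals: its dedup, its counter items, their stable sort
def pvKs (vals : List String) : List String := PySem.Set.ofList vals
def pvCs (vals : List String) : List (String × Int) := (pvKs vals).map (fun k => (k, (vals.count k : Int)))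
def pvS (vals : List String) : List (String × Int) := PySem.List.sorted (pvCs vals) (fun p => p.2) true

-- strict composite order (count desc, position asc) the stable sort realises
def pvRelP (pos : String × Int → Nat) (a b : String × Int) : Prop :=
  b.2 < a.2 ∨ (a.2 = b.2 ∧ pos a < pos b)

theorem pv_relP_le {pos : String × Int → Nat} {a b : String × Int} (h : pvRelP pos a b) : b.2 ≤ a.2 := by
  rcases h with h | ⟨h, _⟩ <;> omega

theorem pv_insertBy_rel (pos : String × Int → Nat) (x : String × Int) :
    ∀ (acc : List (String × Int)), acc.Pairwise (pvRelP pos) → (∀ a ∈ acc, pos a < pos x) →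
    (PySem.List.insertBy (fun a b => decide (b.2 < a.2)) x acc).Pairwise (pvRelP pos) := by
  intro acc
  induction acc with
  | nil =>
    intro _ _
    simp [PySem.List.insertBy, pvRelP]
  | cons y ys ih =>
    intro h hx
    obtain ⟨hy, hys⟩ := List.pairwise_cons.mp h
    by_cases hb : y.2 < x.2
    · have : PySem.List.insertBy (fun a b => decide (b.2 < a.2)) x (y :: ys) = x :: y :: ys := by
        simp [PySem.List.insertBy, hb]
      rw [this]
      refine List.pairwise_cons.mpr ⟨?_, h⟩
      intro z hz
      rcases List.mem_cons.mp hz with rfl | hz'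
      · exact Or.inl hb
      · exact Or.inl (lt_of_le_of_lt (pv_relP_le (hy z hz')) hb)
    · have : PySem.List.insertBy (fun a b => decide (b.2 < a.2)) x (y :: ys)
          = y :: PySem.List.insertBy (fun a b => decide (b.2 < a.2)) x ys := by
        simp [PySem.List.insertBy, hb]
      rw [this]
      refine List.pairwise_cons.mpr ⟨?_, ih hys (fun a ha => hx a (List.mem_cons_of_mem _ ha))⟩
      intro z hz
      rcases (PySem.List.mem_insertBy _ x z ys).mp hz with rfl | hz'
      · rcases lt_or_eq_of_le (le_of_not_gt hb) with hlt | heq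
        · exact Or.inl hlt
        · exact Or.inr ⟨heq.symm, hx y (List.mem_cons_self ..)⟩
      · exact hy z hz'

theorem pv_sortfold_rel (pos : String × Int → Nat) :
    ∀ (todo acc : List (String × Int)), acc.Pairwise (pvRelP pos) →
      (∀ a ∈ acc, ∀ t ∈ todo, pos a < pos t) →
      todo.Pairwise (fun a b => pos a < pos b) →
      (todo.foldl (fun acc x => PySem.List.insertBy (fun a b => decide (b.2 < a.2)) x acc) acc).Pairwise (pvRelP pos) := by
  intro todo
  induction todo with
  | nil => intro acc h _ _; simpa using h
  | cons x rest ih =>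
    intro acc h hx hp
    rw [List.foldl_cons]
    obtain ⟨hx1, hp'⟩ := List.pairwise_cons.mp hp
    apply ih
    · exact pv_insertBy_rel pos x acc h (fun a ha => hx a ha x (List.mem_cons_self ..))
    · intro a ha t ht
      rcases (PySem.List.mem_insertBy _ x a acc).mp ha with rfl | ha'
      · exact hx1 t ht
      · exact hx a ha' t (List.mem_cons_of_mem _ ht)
    · exact hp'

theorem pv_nodup_pairwise_idxOf (l : List String) (h : l.Nodup) :
    l.Pairwise (fun a b => List.idxOf a l < List.idxOf b l) := by
  rw [List.pairwise_iff_getElem]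
  intro i j hi hj hij
  rw [List.Nodup.idxOf_getElem h i hi, List.Nodup.idxOf_getElem h j hj]
  exact hij

theorem pv_S_pairwise (vals : List String) :
    (pvS vals).Pairwise (pvRelP (fun p => List.idxOf p.1 (pvKs vals))) := by
  unfold pvS
  rw [PySem.List.sorted_rev_eq_foldl_insertBy]
  apply pv_sortfold_rel
  · exact List.Pairwise.nil
  · intro a ha; simp at ha
  · unfold pvCs
    rw [List.pairwise_map]
    have := pv_nodup_pairwise_idxOf (pvKs vals) (PySem.Set.nodup_ofList vals)
    exact this.imp (fun {a b} hab => by simpa using hab)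

theorem pv_S_fst_nodup (vals : List String) : ((pvS vals).map Prod.fst).Nodup := by
  have hperm : ((pvS vals).map Prod.fst).Perm ((pvCs vals).map Prod.fst) :=
    (PySem.List.sorted_perm (pvCs vals) (fun p => p.2) true).map Prod.fst
  have hmap : (pvCs vals).map Prod.fst = pvKs vals := by
    unfold pvCs; simp [List.map_map, Function.comp_def]
  rw [hmap] at hperm
  exact hperm.nodup_iff.mpr (PySem.Set.nodup_ofList vals)

theorem pv_mem_cs {vals : List String} {p : String × Int} (h : p ∈ pvCs vals) :
    p.1 ∈ pvKs vals ∧ p.2 = (vals.count p.1 : Int) := by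
  unfold pvCs at h
  rcases List.mem_map.mp h with ⟨k, hk, he⟩
  cases he
  exact ⟨hk, rfl⟩

theorem pv_mem_S {vals : List String} {p : String × Int} : p ∈ pvS vals ↔ p ∈ pvCs vals := by
  exact PySem.List.mem_sorted (pvCs vals) (fun p => p.2) true p

theorem pv_fold_none (cnt : PySem.Dict String Int) (top : List String) :
    ∀ (l : List String) (b0 : Option String), (∀ s ∈ l, top.contains s = true) →
      l.foldl (pvStep cnt top) b0 = b0 := by
  intro l
  induction l with
  | nil => intro b0 _; rfl
  | cons s rest ih =>
    intro b0 h
    rw [List.foldl_cons]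
    have hs : s ∈ top := List.contains_iff_mem.mp (h s (List.mem_cons_self ..))
    rw [show pvStep cnt top b0 s = b0 by simp [pvStep, hs]]
    exact ih b0 (fun t ht => h t (List.mem_cons_of_mem _ ht))

theorem pv_fold_keep (cnt : PySem.Dict String Int) (top : List String) (m : String) :
    ∀ (l : List String), (∀ s ∈ l, top.contains s = true ∨ cnt.getD s 0 ≤ cnt.getD m 0) →
      l.foldl (pvStep cnt top) (some m) = some m := by
  intro l
  induction l with
  | nil => intro _; rfl
  | cons s rest ih =>
    intro h
    rw [List.foldl_cons]
    have hstep : pvStep cnt top (some m) s = some m := by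
      rcases h s (List.mem_cons_self ..) with hc | hle
      · simp [pvStep, List.contains_iff_mem.mp hc]
      · simp only [pvStep]
        split
        · rfl
        · simp [not_lt.mpr hle]
    rw [hstep]
    exact ih (fun t ht => h t (List.mem_cons_of_mem _ ht))

theorem pv_fold_start (cnt : PySem.Dict String Int) (top : List String) :
    ∀ (l : List String), l.foldl (pvStep cnt top) none = none ∨
      ∃ b ∈ l, top.contains b = false ∧ l.foldl (pvStep cnt top) none = some b := by
  have hsome : ∀ (l : List String) (m : String), l.foldl (pvStep cnt top) (some m) = some m ∨
      ∃ b ∈ l, top.contains b = false ∧ l.foldl (pvStep cnt top) (some m) = some b := by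
    intro l
    induction l with
    | nil => intro m; exact Or.inl rfl
    | cons s rest ih =>
      intro m
      rw [List.foldl_cons]
      by_cases hc : top.contains s = true
      · rw [show pvStep cnt top (some m) s = some m by simp [pvStep, List.contains_iff_mem.mp hc]]
        rcases ih m with h | ⟨b, hb, hcb, h⟩
        · exact Or.inl h
        · exact Or.inr ⟨b, List.mem_cons_of_mem _ hb, hcb, h⟩
      · have hc' : top.contains s = false := by simpa using hc
        have hstep : pvStep cnt top (some m) s = some m ∨ pvStep cnt top (some m) s = some s := by
          have hm : s ∉ top := by simpa using hc'
          by_cases hlt : cnt.getD m 0 < cnt.getD s 0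
          · exact Or.inr (by simp [pvStep, hm, hlt])
          · exact Or.inl (by simp [pvStep, hm, hlt])
        rcases hstep with hstep | hstep <;> rw [hstep]
        · rcases ih m with h | ⟨b, hb, hcb, h⟩
          · exact Or.inl h
          · exact Or.inr ⟨b, List.mem_cons_of_mem _ hb, hcb, h⟩
        · rcases ih s with h | ⟨b, hb, hcb, h⟩
          · exact Or.inr ⟨s, List.mem_cons_self .., hc', h⟩
          · exact Or.inr ⟨b, List.mem_cons_of_mem _ hb, hcb, h⟩
  intro l
  induction l with
  | nil => exact Or.inl rfl
  | cons s rest ih =>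
    rw [List.foldl_cons]
    by_cases hc : top.contains s = true
    · rw [show pvStep cnt top none s = none by simp [pvStep, List.contains_iff_mem.mp hc]]
      rcases ih with h | ⟨b, hb, hcb, h⟩
      · exact Or.inl h
      · exact Or.inr ⟨b, List.mem_cons_of_mem _ hb, hcb, h⟩
    · have hc' : top.contains s = false := by simpa using hc
      rw [show pvStep cnt top none s = some s by
            simp [pvStep, show s ∉ top by simpa using hc']]
      rcases hsome rest s with h | ⟨b, hb, hcb, h⟩
      · exact Or.inr ⟨s, List.mem_cons_self .., hc', h⟩
      · exact Or.inr ⟨b, List.mem_cons_of_mem _ hb, hcb, h⟩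

theorem pv_pick_eq (vals : List String) (j : Nat) :
    pvPickBest (PySem.Dict.counter vals) (((pvS vals).take j).map Prod.fst)
      = ((pvS vals)[j]?).map Prod.fst := by
  have hkeys : (PySem.Dict.counter vals).keys = pvKs vals := PySem.Dict.keys_counter vals
  have hgetD : ∀ s, (PySem.Dict.counter vals).getD s 0 = (vals.count s : Int) :=
    fun s => PySem.Dict.getD_counter vals s
  have hSmem : ∀ p ∈ pvS vals, p.1 ∈ pvKs vals ∧ p.2 = (vals.count p.1 : Int) :=
    fun p hp => pv_mem_cs (pv_mem_S.mp hp)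
  have hksS : ∀ s ∈ pvKs vals, (s, (vals.count s : Int)) ∈ pvS vals :=
    fun s hs => pv_mem_S.mpr (List.mem_map_of_mem hs)
  have htopmem : ∀ s, s ∈ ((pvS vals).take j).map Prod.fst ↔
      (s, (vals.count s : Int)) ∈ (pvS vals).take j := by
    intro s
    constructor
    · intro hs
      rcases List.mem_map.mp hs with ⟨p, hp, rfl⟩
      have hp' := hSmem p (List.mem_of_mem_take hp)
      have : p = (p.1, (vals.count p.1 : Int)) := by
        ext
        · rfl
        · exact hp'.2
      rw [← this]
      exact hp
    · intro hs
      exact List.mem_map_of_mem hs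
  by_cases hj : j < (pvS vals).length
  · -- the selected element
    set m := (pvS vals)[j] with hm
    have hj' : (pvS vals)[j]? = some m := List.getElem?_eq_getElem hj
    have hmS : m ∈ pvS vals := List.getElem_mem hj
    obtain ⟨hmks, hm2⟩ := hSmem m hmS
    obtain ⟨ks1, ks2, hksplit⟩ := List.append_of_mem hmks
    have hksnd : (pvKs vals).Nodup := PySem.Set.nodup_ofList vals
    have hksnd' := hksnd
    rw [hksplit] at hksnd'
    obtain ⟨hnd1, hnd2, hdisj⟩ := List.nodup_append.mp hksnd'
    have hm1ks1 : m.1 ∉ ks1 := fun h => hdisj m.1 h m.1 (List.mem_cons_self ..) rfl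
    have hm1ks2 : m.1 ∉ ks2 := (List.nodup_cons.mp hnd2).1
    -- m.1 is not already chosen
    have hmtop : m.1 ∉ ((pvS vals).take j).map Prod.fst := by
      have hnd := pv_S_fst_nodup vals
      have hsplit : (pvS vals).map Prod.fst
          = ((pvS vals).take j).map Prod.fst ++ ((pvS vals).drop j).map Prod.fst := by
        rw [← List.map_append, List.take_append_drop]
      rw [hsplit] at hnd
      obtain ⟨_, _, hdisj'⟩ := List.nodup_append.mp hnd
      intro hmem
      apply hdisj' m.1 hmem m.1 _ rfl
      rw [List.drop_eq_getElem_cons hj]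
      exact List.mem_cons_self ..
    -- order facts from stability
    have hpair := pv_S_pairwise vals
    have hdropPW : ((pvS vals).drop j).Pairwise (pvRelP (fun p => List.idxOf p.1 (pvKs vals))) :=
      List.Pairwise.sublist (List.drop_sublist _ _) hpair
    rw [List.drop_eq_getElem_cons hj] at hdropPW
    obtain ⟨hmrel, _⟩ := List.pairwise_cons.mp hdropPW
    have hkey : ∀ s, s ∈ pvKs vals → s ∉ ((pvS vals).take j).map Prod.fst → s ≠ m.1 →
        pvRelP (fun p => List.idxOf p.1 (pvKs vals)) m (s, (vals.count s : Int)) := by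
      intro s hs hstop hsm
      have hpS := hksS s hs
      rw [← List.take_append_drop j (pvS vals)] at hpS
      rcases List.mem_append.mp hpS with h1 | h2
      · exact absurd ((htopmem s).mpr h1) hstop
      · rw [List.drop_eq_getElem_cons hj] at h2
        rcases List.mem_cons.mp h2 with heq | h3
        · exact absurd (congrArg Prod.fst heq) hsm
        · exact hmrel _ h3
    -- counts of unchosen keys are bounded by m's count
    have hle : ∀ s, s ∈ pvKs vals → s ∉ ((pvS vals).take j).map Prod.fst →
        (vals.count s : Int) ≤ (vals.count m.1 : Int) := by
      intro s hs hstop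
      by_cases hsm : s = m.1
      · subst hsm; exact le_refl _
      · have := pv_relP_le (hkey s hs hstop hsm)
        rw [hm2] at this
        exact this
    -- position facts: everything in ks1 comes before m.1
    have hposm : List.idxOf m.1 (pvKs vals) = ks1.length := by
      rw [hksplit, List.idxOf_append, if_neg hm1ks1, List.idxOf_cons_self]
      omega
    have hlt : ∀ b ∈ ks1, b ∉ ((pvS vals).take j).map Prod.fst →
        (vals.count b : Int) < (vals.count m.1 : Int) := by
      intro b hb hbtop
      have hbks : b ∈ pvKs vals := by rw [hksplit]; exact List.mem_append_left _ hb
      have hbm : b ≠ m.1 := fun h => hm1ks1 (h ▸ hb)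
      have hposb : List.idxOf b (pvKs vals) < ks1.length := by
        rw [hksplit, List.idxOf_append, if_pos hb]
        exact List.idxOf_lt_length_of_mem hb
      rcases hkey b hbks hbtop hbm with h | ⟨_, hpos⟩
      · rw [hm2] at h; exact h
      · have hpos' : List.idxOf m.1 (pvKs vals) < List.idxOf b (pvKs vals) := hpos
        rw [hposm] at hpos'
        exact absurd hposb (by omega)
    -- run the scan
    unfold pvPickBest
    rw [hkeys, hksplit, List.foldl_append, List.foldl_cons, hj']
    have hkeep : ∀ s ∈ ks2,
        (((pvS vals).take j).map Prod.fst).contains s = true ∨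
          (PySem.Dict.counter vals).getD s 0 ≤ (PySem.Dict.counter vals).getD m.1 0 := by
      intro s hs
      by_cases hc : (((pvS vals).take j).map Prod.fst).contains s = true
      · exact Or.inl hc
      · have hstop : s ∉ ((pvS vals).take j).map Prod.fst := by
          intro h; exact absurd (List.contains_iff_mem.mpr h) hc
        have hsks : s ∈ pvKs vals := by
          rw [hksplit]; exact List.mem_append_right _ (List.mem_cons_of_mem _ hs)
        rw [hgetD, hgetD]
        exact Or.inr (hle s hsks hstop)
    have hmtop2 : m.1 ∉ List.take j (List.map Prod.fst (pvS vals)) := by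
      rw [← List.map_take]; exact hmtop
    rcases pv_fold_start (PySem.Dict.counter vals) (((pvS vals).take j).map Prod.fst) ks1
      with h0 | ⟨b, hb, hcb, h0⟩
    · rw [h0, show pvStep (PySem.Dict.counter vals) (((pvS vals).take j).map Prod.fst) none m.1
          = some m.1 by simp [pvStep, hmtop, hmtop2]]
      exact pv_fold_keep _ _ _ _ hkeep
    · rw [h0]
      have hbtop : b ∉ ((pvS vals).take j).map Prod.fst := by
        intro h
        have hh := List.contains_iff_mem.mpr h
        rw [hcb] at hh
        simp at hh
      have hblt : List.count b vals < List.count m.1 vals := by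
        exact_mod_cast hlt b hb hbtop
      rw [show pvStep (PySem.Dict.counter vals) (((pvS vals).take j).map Prod.fst) (some b) m.1
          = some m.1 by simp [pvStep, hmtop, hmtop2, hblt]]
      exact pv_fold_keep _ _ _ _ hkeep
  · -- everything is already chosen: the scan yields none
    have hle : (pvS vals).length ≤ j := by omega
    have htake : (pvS vals).take j = pvS vals := List.take_of_length_le hle
    have hall : ∀ s ∈ (PySem.Dict.counter vals).keys,
        (((pvS vals).take j).map Prod.fst).contains s = true := by
      intro s hs
      rw [hkeys] at hs
      apply List.contains_iff_mem.mpr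
      rw [htake]
      exact List.mem_map.mpr ⟨_, hksS s hs, rfl⟩
    unfold pvPickBest
    rw [pv_fold_none _ _ _ _ hall, List.getElem?_eq_none hle]
    rfl

theorem pv_top3_loop (vals : List String) :
    ∀ (n j : Nat), pvTop3 (PySem.Dict.counter vals) n (((pvS vals).take j).map Prod.fst)
      = ((pvS vals).take (j + n)).map Prod.fst := by
  intro n
  induction n with
  | zero => intro j; simp [pvTop3]
  | succ n ih =>
    intro j
    rw [show pvTop3 (PySem.Dict.counter vals) (n+1) (((pvS vals).take j).map Prod.fst)
        = (match pvPickBest (PySem.Dict.counter vals) (((pvS vals).take j).map Prod.fst) with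
           | none => ((pvS vals).take j).map Prod.fst
           | some b => pvTop3 (PySem.Dict.counter vals) n ((((pvS vals).take j).map Prod.fst) ++ [b])) from rfl,
        pv_pick_eq]
    cases hj : (pvS vals)[j]? with
    | none =>
      have hle : (pvS vals).length ≤ j := by
        by_contra hlt
        rw [List.getElem?_eq_getElem (by omega)] at hj
        simp at hj
      simp only [Option.map_none]
      rw [List.take_of_length_le hle, List.take_of_length_le (by omega)]
    | some m =>
      simp only [Option.map_some]
      have h1 : (((pvS vals).take j).map Prod.fst) ++ [m.1] = ((pvS vals).take (j+1)).map Prod.fst := by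
        rw [List.take_add_one, hj]
        simp
      rw [h1, ih (j+1), show j + 1 + n = j + (n + 1) from by omega]

theorem pv_top3_eq (vals : List String) :
    pvTop3 (PySem.Dict.counter vals) 3 [] = ((pvS vals).take 3).map Prod.fst := by
  have := pv_top3_loop vals 3 0
  simpa using this

theorem pv_top3_isEmpty (vals : List String) :
    (pvTop3 (PySem.Dict.counter vals) 3 []).isEmpty = vals.isEmpty := by
  rw [pv_top3_eq]
  cases vals with
  | nil => rfl
  | cons a t =>
    have hne : pvS (a :: t) ≠ [] := by
      unfold pvS
      rw [Ne, PySem.List.sorted_eq_nil_iff]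
      intro h
      have ha : a ∈ pvKs (a :: t) := (PySem.Set.mem_ofList _ _).mpr (List.mem_cons_self ..)
      have : (a, ((a :: t).count a : Int)) ∈ pvCs (a :: t) := by
        unfold pvCs
        exact List.mem_map_of_mem ha
      rw [h] at this
      exact absurd this (List.not_mem_nil)
    cases hS : pvS (a :: t) with
    | nil => exact absurd hS hne
    | cons p rest => simp

-- B's per-key count dict is Counter of the key's value list
theorem pv_cnt_eq (pairs : List (String × String)) (k : String) :
    pairs.foldl (fun d p => if p.1 == k then d.insert p.2 (d.getD p.2 0 + 1) else d) PySem.Dict.empty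
      = PySem.Dict.counter ((pairs.filter (fun p => p.1 == k)).map (fun p => p.2)) := by
  have h1 := PySem.List.foldl_if_eq_foldl_filter (fun (p : String × String) => p.1 == k)
    (fun (d : PySem.Dict String Int) (p : String × String) => d.insert p.2 (d.getD p.2 0 + 1))
    pairs PySem.Dict.empty
  rw [h1, ← PySem.Dict.foldl_insert_getD_add_one_eq_counter, List.foldl_map]

-- inserting twice under the same key collapses
theorem pv_insert_insert (d : PySem.Dict String (List String)) (k : String) (a b : List String) :
    (d.insert k a).insert k b = d.insert k b := by
  apply PySem.Dict.ext
  by_cases hc : d.contains k = true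
  · rw [PySem.Dict.items_insert_of_contains _ b (PySem.Dict.contains_insert_self d k a),
        PySem.Dict.items_insert_of_contains d a hc,
        PySem.Dict.items_insert_of_contains d b hc, List.map_map]
    apply List.map_congr_left
    intro p _
    by_cases h : p.1 == k <;> simp [h, Function.comp]
  · have hc' : d.contains k = false := by simpa using hc
    have hk : k ∉ d.keys := by
      intro hm
      exact absurd ((PySem.Dict.contains_iff_mem_keys d k).mpr hm) (by simp [hc'])
    rw [PySem.Dict.items_insert_of_contains _ b (PySem.Dict.contains_insert_self d k a),
        PySem.Dict.items_insert_of_not_contains d a hc',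
        PySem.Dict.items_insert_of_not_contains d b hc', List.map_append]
    congr 1
    · conv_rhs => rw [← List.map_id d.items]
      apply List.map_congr_left
      intro p hp
      have hp1 : p.1 ∈ d.keys := List.mem_map_of_mem hp
      have hne : ¬ (p.1 == k) = true := fun hbe => hk ((eq_of_beq hbe) ▸ hp1)
      simp [hne]
    · simp

-- re-inserting the looked-up value is a no-op (unique keys)
theorem pv_insert_getD_self (d : PySem.Dict String (List String)) (k : String)
    (hc : d.contains k = true) (hnd : d.keys.Nodup) : d.insert k (d.getD k []) = d := by
  apply PySem.Dict.ext
  rw [PySem.Dict.items_insert_of_contains d _ hc]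
  conv_rhs => rw [← List.map_id d.items]
  apply List.map_congr_left
  rintro ⟨p1, p2⟩ hp
  by_cases h : (p1 == k) = true
  · have hk : p1 = k := eq_of_beq h
    subst hk
    have hgd := PySem.Dict.getD_of_mem_items d hp hnd []
    simp [hgd]
  · simp [h]

-- A's per-item append loop, closed form (needs a key already present)
theorem pv_inner_fold (k : String) (v : List String) :
    ∀ (d0 : PySem.Dict String (List String)), d0.contains k = true → d0.keys.Nodup →
      v.foldl (fun d item => d.insert k (d.getD k [] ++ [item])) d0
        = d0.insert k (d0.getD k [] ++ v) := by
  induction v with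
  | nil =>
    intro d0 hc hnd
    rw [List.foldl_nil, List.append_nil, pv_insert_getD_self d0 k hc hnd]
  | cons it rest ih =>
    intro d0 hc hnd
    rw [List.foldl_cons,
        ih _ (PySem.Dict.contains_insert_self _ _ _) (PySem.Dict.nodup_keys_insert _ _ _ hnd),
        PySem.Dict.getD_insert_self, pv_insert_insert]
    simp [List.append_assoc]

-- A's inner per-(k, v) loop, closed form
theorem pv_innerA (k : String) (v : List String) (d : PySem.Dict String (List String))
    (hnd : d.keys.Nodup) :
    v.foldl (fun d item => d.insert k (d.getD k [] ++ [item])) (d.setdefault k [])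
      = d.insert k (d.getD k [] ++ v) := by
  by_cases hc : d.contains k = true
  · rw [PySem.Dict.setdefault_of_contains d [] hc]
    exact pv_inner_fold k v d hc hnd
  · have hc' : d.contains k = false := by simpa using hc
    rw [PySem.Dict.setdefault_of_not_contains d [] hc',
        pv_inner_fold k v _ (PySem.Dict.contains_insert_self _ _ _)
          (PySem.Dict.nodup_keys_insert _ _ _ hnd),
        PySem.Dict.getD_insert_self, pv_insert_insert, PySem.Dict.getD_of_not_contains d [] hc']

-- keys of an insert
theorem pv_keys_insert (d : PySem.Dict String (List String)) (k : String) (v : List String) :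
    (d.insert k v).keys = if d.contains k then d.keys else d.keys ++ [k] := by
  by_cases hc : d.contains k = true
  · rw [hc, if_pos rfl]
    show ((d.insert k v).items).map (fun p => p.1) = d.items.map (fun p => p.1)
    rw [PySem.Dict.items_insert_of_contains d v hc, List.map_map]
    apply List.map_congr_left
    intro p _
    by_cases h : (p.1 == k) = true
    · simp [eq_of_beq h]
    · have h' : p.1 ≠ k := by simpa using h
      simp [h']
  · have hc' : d.contains k = false := by simpa using hc
    rw [hc', if_neg (by simp)]
    show ((d.insert k v).items).map (fun p => p.1) = d.items.map (fun p => p.1) ++ [k]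
    rw [PySem.Dict.items_insert_of_not_contains d v hc', List.map_append]
    rfl

-- one (k, v) attribute step preserves the gather invariant
theorem pv_attrs_gather (attrs : List (String × List String)) :
    ∀ (d : PySem.Dict String (List String)) (pairs : List (String × String)) (ko : List String),
      ko = d.keys → (∀ k, (pairs.filter (fun p => p.1 == k)).map (fun p => p.2) = d.getD k []) →
      d.keys.Nodup →
      (attrs.foldl (fun (pk : List (String × String) × List String) kv =>
          let ko' := if pk.2.contains kv.1 then pk.2 else pk.2 ++ [kv.1]
          (kv.2.foldl (fun ps item => ps ++ [(kv.1, item)]) pk.1, ko')) (pairs, ko)).2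
        = (attrs.foldl (fun d kv =>
            kv.2.foldl (fun d item => d.insert kv.1 (d.getD kv.1 [] ++ [item]))
              (d.setdefault kv.1 [])) d).keys
      ∧ (∀ k, ((attrs.foldl (fun (pk : List (String × String) × List String) kv =>
          let ko' := if pk.2.contains kv.1 then pk.2 else pk.2 ++ [kv.1]
          (kv.2.foldl (fun ps item => ps ++ [(kv.1, item)]) pk.1, ko')) (pairs, ko)).1.filter
            (fun p => p.1 == k)).map (fun p => p.2)
          = (attrs.foldl (fun d kv =>
            kv.2.foldl (fun d item => d.insert kv.1 (d.getD kv.1 [] ++ [item]))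
              (d.setdefault kv.1 [])) d).getD k [])
      ∧ (attrs.foldl (fun d kv =>
            kv.2.foldl (fun d item => d.insert kv.1 (d.getD kv.1 [] ++ [item]))
              (d.setdefault kv.1 [])) d).keys.Nodup := by
  induction attrs with
  | nil =>
    intro d pairs ko hko hfil hnd
    exact ⟨hko, hfil, hnd⟩
  | cons kv rest ih =>
    intro d pairs ko hko hfil hnd
    simp only [List.foldl_cons]
    rw [pv_innerA kv.1 kv.2 d hnd]
    apply ih
    · rw [pv_keys_insert]
      have hcc : ko.contains kv.1 = d.contains kv.1 := by
        rw [hko, PySem.Dict.contains_eq_decide_mem_keys]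
        by_cases hm : kv.1 ∈ d.keys <;> simp [hm]
      rw [hcc, hko]
      all_goals by_cases hc : d.contains kv.1 = true <;> simp [hc]
    · intro k
      simp only [PySem.List.foldl_append_singleton_eq_map]
      rw [List.filter_append, List.map_append, hfil]
      by_cases hkk : kv.1 = k
      · subst hkk
        have hf : (kv.2.map (fun item => (kv.1, item))).filter (fun p => p.1 == kv.1)
            = kv.2.map (fun item => (kv.1, item)) := by
          rw [List.filter_map]
          simp [Function.comp_def]
        rw [hf, PySem.Dict.getD_insert_self, List.map_map]
        simp [Function.comp_def]
      · have hf : (kv.2.map (fun item => (kv.1, item))).filter (fun p => p.1 == k) = [] := by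
          rw [List.filter_map]
          have hz : kv.2.filter ((fun (p : String × String) => p.1 == k) ∘ (fun item => (kv.1, item))) = [] := by
            apply List.filter_eq_nil_iff.mpr
            intro a _
            simp [Function.comp_def, hkk]
          rw [hz, List.map_nil]
        rw [hf, List.map_nil, List.append_nil]
        conv_rhs => rw [PySem.Dict.getD_eq_get?_getD,
          PySem.Dict.get?_insert_of_ne d _ (fun h => hkk h.symm)]
        rw [PySem.Dict.getD_eq_get?_getD]
    · exact PySem.Dict.nodup_keys_insert d kv.1 _ hnd


-- the whole gathering fold: B's (pairs, key_order, found) vs A's dict over the filtered list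
-- the two gathering folds, named (proof-side abbreviations of the ports' loops)
def pvStA (rl : List (List (String × List (String × List String)))) (d : PySem.Dict String (List String)) : PySem.Dict String (List String) :=
  (rl.filter (fun r => ((PySem.Dict.mk r).get? "attributes").isSome)).foldl (fun d r =>
    (((PySem.Dict.mk r).get? "attributes").getD []).foldl (fun d kv =>
      kv.2.foldl (fun d item => d.insert kv.1 (d.getD kv.1 [] ++ [item]))
        (d.setdefault kv.1 [])) d) d

def pvStB (rl : List (List (String × List (String × List String)))) (st : List (String × String) × List String × Bool) : List (String × String) × List String × Bool :=
  rl.foldl (fun st r =>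
    match (PySem.Dict.mk r).get? "attributes" with
    | none => st
    | some attrs =>
      let pk := attrs.foldl
        (fun (pk : List (String × String) × List String) kv =>
          let ko' := if pk.2.contains kv.1 then pk.2 else pk.2 ++ [kv.1]
          (kv.2.foldl (fun ps item => ps ++ [(kv.1, item)]) pk.1, ko'))
        (st.1, st.2.1)
      (pk.1, pk.2, true)) st

theorem pv_rl_gather (rl : List (List (String × List (String × List String)))) :
    ∀ (d : PySem.Dict String (List String)) (pairs : List (String × String)) (ko : List String) (f : Bool),
      ko = d.keys → (∀ k, (pairs.filter (fun p => p.1 == k)).map (fun p => p.2) = d.getD k []) →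
      d.keys.Nodup →
      (pvStB rl (pairs, ko, f)).2.1 = (pvStA rl d).keys
      ∧ (∀ k, ((pvStB rl (pairs, ko, f)).1.filter (fun p => p.1 == k)).map (fun p => p.2)
          = (pvStA rl d).getD k [])
      ∧ (pvStA rl d).keys.Nodup
      ∧ (pvStB rl (pairs, ko, f)).2.2
        = (f || rl.any (fun r => ((PySem.Dict.mk r).get? "attributes").isSome)) := by
  induction rl with
  | nil =>
    intro d pairs ko f hko hfil hnd
    exact ⟨hko, hfil, hnd, by simp [pvStB]⟩
  | cons r rest ih =>
    intro d pairs ko f hko hfil hnd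
    cases hG : (PySem.Dict.mk r).get? "attributes" with
    | none =>
      have hB : ∀ st : List (String × String) × List String × Bool,
          pvStB (r :: rest) st = pvStB rest st := by
        intro st
        simp only [pvStB, List.foldl_cons, hG]
      have hA : pvStA (r :: rest) d = pvStA rest d := by
        simp only [pvStA, List.filter_cons, hG, Option.isSome_none, Bool.false_eq_true, if_false]
      rw [hB, hA]
      obtain ⟨h1, h2, h3, h4⟩ := ih d pairs ko f hko hfil hnd
      refine ⟨h1, h2, h3, ?_⟩
      rw [h4]
      simp [hG]
    | some attrs =>
      obtain ⟨g1, g2, g3⟩ := pv_attrs_gather attrs d pairs ko hko hfil hnd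
      have hB : pvStB (r :: rest) (pairs, ko, f)
          = pvStB rest ((attrs.foldl
              (fun (pk : List (String × String) × List String) kv =>
                let ko' := if pk.2.contains kv.1 then pk.2 else pk.2 ++ [kv.1]
                (kv.2.foldl (fun ps item => ps ++ [(kv.1, item)]) pk.1, ko'))
              (pairs, ko)).1,
            (attrs.foldl
              (fun (pk : List (String × String) × List String) kv =>
                let ko' := if pk.2.contains kv.1 then pk.2 else pk.2 ++ [kv.1]
                (kv.2.foldl (fun ps item => ps ++ [(kv.1, item)]) pk.1, ko'))
              (pairs, ko)).2, true) := by
        simp only [pvStB, List.foldl_cons, hG]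
      have hA : pvStA (r :: rest) d
          = pvStA rest (attrs.foldl (fun d kv =>
              kv.2.foldl (fun d item => d.insert kv.1 (d.getD kv.1 [] ++ [item]))
                (d.setdefault kv.1 [])) d) := by
        simp only [pvStA, List.filter_cons, hG, Option.isSome_some, if_true, List.foldl_cons,
          Option.getD_some]
      rw [hB, hA]
      obtain ⟨h1, h2, h3, h4⟩ := ih _ _ _ true g1 g2 g3
      refine ⟨h1, h2, h3, ?_⟩
      rw [h4]
      simp [hG]

-- the two summary folds agree under the gather invariant
theorem pv_summary (d : PySem.Dict String (List String)) (pairs : List (String × String))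
    (hfil : ∀ k, (pairs.filter (fun p => p.1 == k)).map (fun p => p.2) = d.getD k [])
    (hnd : d.keys.Nodup) :
    d.keys.foldl
      (fun (s : PySem.Dict String (List String)) k =>
        let cnt := pairs.foldl
          (fun (d' : PySem.Dict String Int) p =>
            if p.1 == k then d'.insert p.2 (d'.getD p.2 0 + 1) else d')
          PySem.Dict.empty
        let top := pvTop3 cnt 3 []
        if top.isEmpty then s else s.insert k top)
      PySem.Dict.empty
    = d.items.foldl (fun s kv =>
        if kv.2.isEmpty then s
        else s.insert kv.1 (((PySem.List.sorted (PySem.Dict.counter kv.2).items (fun p => p.2) true).take 3).map (fun p => p.1)))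
        PySem.Dict.empty := by
  have hk : d.keys = d.items.map (fun p => p.1) := rfl
  rw [hk, List.foldl_map]
  apply PySem.List.foldl_congr_mem
  intro acc kv hkv
  have hv : d.getD kv.1 [] = kv.2 := PySem.Dict.getD_of_mem_items d hkv hnd []
  have hcnt : pairs.foldl
      (fun (d' : PySem.Dict String Int) p =>
        if p.1 == kv.1 then d'.insert p.2 (d'.getD p.2 0 + 1) else d')
      PySem.Dict.empty = PySem.Dict.counter kv.2 := by
    rw [pv_cnt_eq, hfil kv.1, hv]
  have hval : pvTop3 (PySem.Dict.counter kv.2) 3 []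
      = ((PySem.List.sorted (PySem.Dict.counter kv.2).items (fun p => p.2) true).take 3).map (fun p => p.1) := by
    rw [pv_top3_eq]
    unfold pvS pvCs pvKs
    rw [PySem.Dict.items_counter]
  simp only [hcnt]
  rw [pv_top3_isEmpty, hval]

-- ===== VERDICT (by name: the statement is the Claim_ definition above) =====
theorem combine_multiple_image_results_spec : Claim_equal_combine_multiple_image_results := by
  intro rl _
  unfold Spec_combine_multiple_image_results
  have hA : combine_multiple_image_results rl =
      (if (rl.filter (fun r => ((PySem.Dict.mk r).get? "attributes").isSome)).isEmpty then none
       else some (((pvStA rl PySem.Dict.empty).items.foldl (fun s kv =>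
            if kv.2.isEmpty then s
            else s.insert kv.1 (((PySem.List.sorted (PySem.Dict.counter kv.2).items
              (fun p => p.2) true).take 3).map (fun p => p.1)))
          PySem.Dict.empty).items)) := rfl
  have hB : combine_multiple_image_results_alt rl =
      (if !(pvStB rl ([], [], false)).2.2 then none
       else some (((pvStB rl ([], [], false)).2.1.foldl
          (fun (s : PySem.Dict String (List String)) k =>
            let cnt := (pvStB rl ([], [], false)).1.foldl
              (fun (d : PySem.Dict String Int) p =>
                if p.1 == k then d.insert p.2 (d.getD p.2 0 + 1) else d)
              PySem.Dict.empty
            let top := pvTop3 cnt 3 []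
            if top.isEmpty then s else s.insert k top)
          PySem.Dict.empty).items)) := rfl
  obtain ⟨hko, hfil, hnd, hflag⟩ :=
    pv_rl_gather rl PySem.Dict.empty [] [] false rfl (fun k => rfl) List.nodup_nil
  rw [hA, hB, hflag]
  cases hAny : rl.any (fun r => ((PySem.Dict.mk r).get? "attributes").isSome) with
  | false =>
    have hnil : rl.filter (fun r => ((PySem.Dict.mk r).get? "attributes").isSome) = [] := by
      rw [List.filter_eq_nil_iff]
      intro a ha
      exact by simpa using (List.any_eq_false.mp hAny) a ha
    rw [hnil]
    rfl
  | true =>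
    have hne : (rl.filter (fun r => ((PySem.Dict.mk r).get? "attributes").isSome)).isEmpty = false := by
      obtain ⟨x, hx, hpx⟩ := List.any_eq_true.mp hAny
      have : x ∈ rl.filter (fun r => ((PySem.Dict.mk r).get? "attributes").isSome) :=
        List.mem_filter.mpr ⟨hx, hpx⟩
      cases hF : rl.filter (fun r => ((PySem.Dict.mk r).get? "attributes").isSome) with
      | nil => rw [hF] at this; exact absurd this (List.not_mem_nil)
      | cons y t => rfl
    rw [hne, hko, pv_summary (pvStA rl PySem.Dict.empty) (pvStB rl ([], [], false)).1 hfil hnd]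
    simp
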